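-- pv_equiv track=rewrite | github.com/jayden-dragon/Euclidean_distance | eucliean_distance.py | e_d
-- ===== SOURCE A (Python) =====
-- def e_d(x, y):
--
--     result=[]
--
--     for w in range(0,6,2):
--
--         z = (x[0]-y[w])^2+(x[1]-y[w+1])^2
--
--         tmp = z
--
--         result.append(tmp)
--
--
--
--     if  min(result)==result[0]:
--
--         return 0
--
--
--
--     elif  min(result)==result[1]:
--
--         return 1
--
--
--
--     elif  min(result)==result[2]:
--
--         return 2
-- ===== SOURCE B (Python) =====
-- def e_d(x, y):
--     best_idx = -1
--     best_val = None
--     for i in range(3):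
--         z = (x[0]-y[2*i])^2+(x[1]-y[2*i+1])^2
--         if best_val is None or z < best_val:
--             best_idx, best_val = i, z
--     return best_idx
-- ===== Notes on version B (the rewrite author's own statement) =====
-- stated objective: simpler
-- what changed: B replaces A's build-a-list-then-rescan-with-min-and-three-equality-branches by a single running-minimum pass that tracks the best index directly (strict < keeps A's first-match tie-breaking).
import Mathlib
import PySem

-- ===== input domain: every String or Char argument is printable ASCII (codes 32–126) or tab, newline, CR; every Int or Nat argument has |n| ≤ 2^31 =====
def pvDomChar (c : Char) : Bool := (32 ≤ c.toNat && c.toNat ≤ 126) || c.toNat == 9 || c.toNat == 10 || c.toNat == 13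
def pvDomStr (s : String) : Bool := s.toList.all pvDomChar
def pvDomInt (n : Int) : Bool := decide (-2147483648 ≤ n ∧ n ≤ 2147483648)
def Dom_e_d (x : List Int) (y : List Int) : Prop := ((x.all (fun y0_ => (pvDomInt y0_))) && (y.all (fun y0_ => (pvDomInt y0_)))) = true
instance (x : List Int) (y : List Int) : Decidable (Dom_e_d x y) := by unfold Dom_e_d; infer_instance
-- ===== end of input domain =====

-- B replaces A's build-a-list-then-rescan-with-min-and-branch-chain by one running-minimum pass
-- tracking the best index (strict < keeps A's first-match tie-breaking); same return value.

-- ===== PORT A =====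
-- Note: Python's '^' is XOR (lower precedence than '+'), so A's z is ((x[0]-y[w]) ^ (2+(x[1]-y[w+1]))) ^ 2.
-- Indices are in range under Pre_e_d, so the pyGetD default 0 is never read; the final 'else 0'
-- mirrors Python's unreachable fall-through (min of the 3-element list is always one of its entries).
def e_d (x : List Int) (y : List Int) : Int :=
  let result := (PySem.List.pyRange 0 6 2).foldl (fun (result : List Int) (w : Int) =>
    let z := PySem.Int.bxor (PySem.Int.bxor (PySem.List.pyGetD x 0 0 - PySem.List.pyGetD y w 0)
              (2 + (PySem.List.pyGetD x 1 0 - PySem.List.pyGetD y (w+1) 0))) 2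
    result ++ [z]) []
  match PySem.List.min? result (fun v => v) with
  | some m =>
    if m = PySem.List.pyGetD result 0 0 then 0
    else if m = PySem.List.pyGetD result 1 0 then 1
    else if m = PySem.List.pyGetD result 2 0 then 2
    else 0
  | none => 0

-- ===== PORT B =====
def e_d_alt (x : List Int) (y : List Int) : Int :=
  let st := (PySem.List.pyRange 0 3 1).foldl (fun (st : Int × Option Int) (i : Int) =>
    let z := PySem.Int.bxor (PySem.Int.bxor (PySem.List.pyGetD x 0 0 - PySem.List.pyGetD y (2*i) 0)
              (2 + (PySem.List.pyGetD x 1 0 - PySem.List.pyGetD y (2*i+1) 0))) 2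
    match st.2 with
    | none => (i, some z)
    | some bv => if z < bv then (i, some z) else st) (-1, none)
  st.1

-- ===== PRECONDITION & SPEC =====
-- Pre_ excludes exactly the inputs on which Python A raises IndexError (x shorter than 2 or y shorter than 6).
def Pre_e_d (x : List Int) (y : List Int) : Prop := 2 ≤ x.length ∧ 6 ≤ y.length
instance (x : List Int) (y : List Int) : Decidable (Pre_e_d x y) := by unfold Pre_e_d; infer_instance
def pvWitness_e_d : List Int × List Int := ([1, 2], [0, 0, 1, 2, 5, 5])

def Spec_e_d (x : List Int) (y : List Int) (out : Int) : Prop := out = e_d_alt x y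
instance (x : List Int) (y : List Int) (out : Int) : Decidable (Spec_e_d x y out) := by unfold Spec_e_d; infer_instance

-- ===== CLAIM (what is proved, stated in full; the proofs are below) =====
def Claim_equal_e_d : Prop := ∀ (x : List Int) (y : List Int), Dom_e_d x y → Pre_e_d x y → Spec_e_d x y (e_d x y)

-- ===== LEMMAS AND PROOFS =====

-- ===== VERDICT (by name: the statement is the Claim_ definition above) =====
theorem e_d_spec : Claim_equal_e_d := by
  intro x y _ _
  unfold Spec_e_d e_d e_d_alt
  have hr : PySem.List.pyRange 0 6 2 = [0, 2, 4] := by decide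
  have hr3 : PySem.List.pyRange 0 3 1 = [0, 1, 2] := by decide
  rw [hr, hr3]
  simp only [List.foldl]
  norm_num
  generalize (PySem.Int.bxor (PySem.Int.bxor (PySem.List.pyGetD x 0 0 - PySem.List.pyGetD y 0 0)
      (2 + (PySem.List.pyGetD x 1 0 - PySem.List.pyGetD y 1 0))) 2) = z0
  generalize (PySem.Int.bxor (PySem.Int.bxor (PySem.List.pyGetD x 0 0 - PySem.List.pyGetD y 2 0)
      (2 + (PySem.List.pyGetD x 1 0 - PySem.List.pyGetD y 3 0))) 2) = z1
  generalize (PySem.Int.bxor (PySem.Int.bxor (PySem.List.pyGetD x 0 0 - PySem.List.pyGetD y 4 0)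
      (2 + (PySem.List.pyGetD x 1 0 - PySem.List.pyGetD y 5 0))) 2) = z2
  simp [PySem.List.min?, PySem.List.pyGetD, PySem.List.pyIdx?, PySem.List.pyGet?]
  by_cases h1 : z1 < z0 <;> by_cases h2 : z2 < z1 <;> by_cases h3 : z2 < z0 <;>
    simp [h1, h2, h3] <;> (try split_ifs) <;> omega
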